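-- pv_equiv track=rewrite | github.com/therealMrFunGuy/changelog-hq | rewriter.py | _fallback_rewrite
-- ===== SOURCE A (Python) =====
-- def _fallback_rewrite(title: str, body: str) -> dict:
--     """Clean up a PR title/body when LLM is unavailable."""
--     # Remove common prefixes like "feat:", "fix:", etc.
--     clean_title = title.strip()
--     for prefix in ["feat:", "fix:", "chore:", "docs:", "refactor:", "perf:", "ci:", "test:",
--                     "feat(", "fix(", "chore(", "docs(", "refactor(", "perf("]:
--         if clean_title.lower().startswith(prefix):
--             if "(" in prefix:
--                 paren_end = clean_title.find(")")
--                 if paren_end != -1: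
--                     clean_title = clean_title[paren_end + 1:].strip().lstrip(":").strip()
--             else:
--                 clean_title = clean_title[len(prefix):].strip()
--             break
--
--     # Capitalize first letter
--     if clean_title:
--         clean_title = clean_title[0].upper() + clean_title[1:]
--
--     # Extract first meaningful sentence from body
--     clean_body = ""
--     if body:
--         lines = body.strip().split("\n")
--         for line in lines:
--             line = line.strip()
--             if line and not line.startswith("#") and not line.startswith("<!--") and len(line) > 10:
--                 clean_body = line[:200]
--                 break
--
--     return {"title": clean_title, "body": clean_body}
-- ===== SOURCE B (Python) =====
-- def _fallback_rewrite(title: str, body: str) -> dict: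
--     """Clean up a PR title/body when LLM is unavailable."""
--     t = title.strip()
--     low = t.lower()
--     # keyword = maximal leading alphabetic run; the character after it decides the form
--     n = next((j for j, c in enumerate(low) if not c.isalpha()), len(low))
--     kw = low[:n]
--     if n < len(t) and t[n] == ":" and kw in {"feat", "fix", "chore", "docs", "refactor", "perf", "ci", "test"}:
--         t = t[n + 1:].strip()
--     elif n < len(t) and t[n] == "(" and kw in {"feat", "fix", "chore", "docs", "refactor", "perf"}:
--         p = t.find(")")
--         if p != -1:
--             t = t[p + 1:].strip().lstrip(":").strip()
--     clean_title = t[:1].upper() + t[1:]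
--     clean_body = ""
--     if body:
--         clean_body = next(
--             (s[:200] for s in (ln.strip() for ln in body.strip().split("\n"))
--              if s and not s.startswith("#") and not s.startswith("<!--") and len(s) > 10),
--             "")
--     return {"title": clean_title, "body": clean_body}
-- ===== Notes on version B (the rewrite author's own statement) =====
-- stated objective: alternative
-- what changed: A's 14-way ordered startswith-prefix loop is replaced by reading the maximal leading alphabetic keyword of the lowercased title and dispatching on the single delimiter character after it (':' vs '('), and the body-line for/break loop becomes a next()-over-generator; same cost.
import Mathlib
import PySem

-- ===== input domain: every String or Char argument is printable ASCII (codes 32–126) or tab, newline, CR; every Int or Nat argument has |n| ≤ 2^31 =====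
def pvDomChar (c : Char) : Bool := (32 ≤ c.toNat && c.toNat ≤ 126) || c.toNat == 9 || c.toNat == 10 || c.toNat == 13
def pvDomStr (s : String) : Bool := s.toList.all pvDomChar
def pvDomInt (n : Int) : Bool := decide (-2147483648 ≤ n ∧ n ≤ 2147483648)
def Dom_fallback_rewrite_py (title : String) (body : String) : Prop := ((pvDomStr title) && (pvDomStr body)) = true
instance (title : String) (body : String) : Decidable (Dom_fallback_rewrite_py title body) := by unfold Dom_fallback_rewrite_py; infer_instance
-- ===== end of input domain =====

-- B replaces A's 14-prefix startswith loop by reading off the maximal leading alphabetic keyword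
-- and the single delimiter character after it (objective: alternative decomposition, same cost).

-- ===== PORT A =====
-- exact port of s.lstrip(":"): drop leading ':' characters
def pvLstripColon (s : List Char) : List Char := s.dropWhile (· == ':')

def pvPrefixesA : List (List Char) :=
  [['f', 'e', 'a', 't', ':'],
   ['f', 'i', 'x', ':'],
   ['c', 'h', 'o', 'r', 'e', ':'],
   ['d', 'o', 'c', 's', ':'],
   ['r', 'e', 'f', 'a', 'c', 't', 'o', 'r', ':'],
   ['p', 'e', 'r', 'f', ':'],
   ['c', 'i', ':'],
   ['t', 'e', 's', 't', ':'],
   ['f', 'e', 'a', 't', '('],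
   ['f', 'i', 'x', '('],
   ['c', 'h', 'o', 'r', 'e', '('],
   ['d', 'o', 'c', 's', '('],
   ['r', 'e', 'f', 'a', 'c', 't', 'o', 'r', '('],
   ['p', 'e', 'r', 'f', '(']]

-- body of the matched-prefix branch of A's loop
def pvApplyPrefixA (p t : List Char) : List Char :=
  if p.contains '(' then
    let paren_end := PySem.Chars.find t [')']
    if paren_end ≠ -1 then
      PySem.Chars.strip (pvLstripColon (PySem.Chars.strip (PySem.Chars.slice t (some (paren_end + 1)) none)))
    else t
  else
    PySem.Chars.strip (PySem.Chars.slice t (some (p.length : Int)) none)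

-- A's for-loop over the prefix list with break
def pvLoopA (t : List Char) : List (List Char) → List Char
  | [] => t
  | p :: ps => if PySem.Chars.startswith (PySem.Chars.lower t) p then pvApplyPrefixA p t else pvLoopA t ps

-- 'if clean_title: clean_title = clean_title[0].upper() + clean_title[1:]'
def pvCapA (t : List Char) : List Char :=
  match t with
  | [] => t
  | c :: r => PySem.Chars.upperChar c :: r

-- A's for-loop over the body lines with break
def pvBodyA : List (List Char) → List Char
  | [] => []
  | l :: ls =>
    let s := PySem.Chars.strip l
    if !s.isEmpty && !PySem.Chars.startswith s ['#'] && !PySem.Chars.startswith s ['<', '!', '-', '-']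
         && decide (10 < s.length) then
      PySem.Chars.slice s none (some 200)
    else pvBodyA ls

def fallback_rewrite_py (title : String) (body : String) : List (String × String) :=
  let clean_title := pvCapA (pvLoopA (PySem.Chars.strip title.toList) pvPrefixesA)
  let clean_body :=
    if body.toList ≠ [] then
      pvBodyA (PySem.Chars.splitOn (PySem.Chars.strip body.toList) ['\n'])
    else []
  [("title", String.ofList clean_title), ("body", String.ofList clean_body)]

-- ===== PORT B =====
def pvColonKwsB : List (List Char) :=
  [['f', 'e', 'a', 't'],
   ['f', 'i', 'x'],
   ['c', 'h', 'o', 'r', 'e'],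
   ['d', 'o', 'c', 's'],
   ['r', 'e', 'f', 'a', 'c', 't', 'o', 'r'],
   ['p', 'e', 'r', 'f'],
   ['c', 'i'],
   ['t', 'e', 's', 't']]

def pvParenKwsB : List (List Char) :=
  [['f', 'e', 'a', 't'],
   ['f', 'i', 'x'],
   ['c', 'h', 'o', 'r', 'e'],
   ['d', 'o', 'c', 's'],
   ['r', 'e', 'f', 'a', 'c', 't', 'o', 'r'],
   ['p', 'e', 'r', 'f']]

-- keyword = maximal leading alphabetic run of the lowercased title; the char after it decides the form
def pvStripPrefixB (t : List Char) : List Char :=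
  let low := PySem.Chars.lower t
  let kw := low.takeWhile PySem.Chars.isalpha
  let n := kw.length
  if decide (n < t.length) && (t[n]? == some ':') && pvColonKwsB.contains kw then
    PySem.Chars.strip (PySem.Chars.slice t (some ((n : Int) + 1)) none)
  else if decide (n < t.length) && (t[n]? == some '(') && pvParenKwsB.contains kw then
    let p := PySem.Chars.find t [')']
    if p ≠ -1 then
      PySem.Chars.strip (pvLstripColon (PySem.Chars.strip (PySem.Chars.slice t (some (p + 1)) none)))
    else t
  else t

-- next((s[:200] for s in (ln.strip() for ln in lines) if <cond>), "")
def pvBodyB (lines : List (List Char)) : List Char :=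
  match (lines.map PySem.Chars.strip).find?
      (fun s => !s.isEmpty && !PySem.Chars.startswith s ['#'] && !PySem.Chars.startswith s ['<', '!', '-', '-']
         && decide (10 < s.length)) with
  | some s => PySem.Chars.slice s none (some 200)
  | none => []

def fallback_rewrite_py_alt (title : String) (body : String) : List (String × String) :=
  let t := pvStripPrefixB (PySem.Chars.strip title.toList)
  -- t[:1].upper() + t[1:]
  let clean_title := PySem.Chars.upper (t.take 1) ++ t.drop 1
  let clean_body :=
    if body.toList ≠ [] then
      pvBodyB (PySem.Chars.splitOn (PySem.Chars.strip body.toList) ['\n'])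
    else []
  [("title", String.ofList clean_title), ("body", String.ofList clean_body)]

-- ===== PRECONDITION & SPEC =====
def Spec_fallback_rewrite_py (title : String) (body : String) (out : List (String × String)) : Prop := out = fallback_rewrite_py_alt title body
instance (title : String) (body : String) (out : List (String × String)) : Decidable (Spec_fallback_rewrite_py title body out) := by unfold Spec_fallback_rewrite_py; infer_instance

-- ===== CLAIM (what is proved, stated in full; the proofs are below) =====
def Claim_equal_fallback_rewrite_py : Prop := ∀ (title : String) (body : String), Dom_fallback_rewrite_py title body → Spec_fallback_rewrite_py title body (fallback_rewrite_py title body)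

-- ===== LEMMAS AND PROOFS =====

theorem pv_isupper_bounds (c : Char) (hu : PySem.Chars.isupper c = true) : 65 ≤ c.toNat ∧ c.toNat ≤ 90 := by
  simp only [PySem.Chars.isupper, Bool.and_eq_true, decide_eq_true_eq, Char.le_def] at hu
  obtain ⟨h1, h2⟩ := hu
  rw [UInt32.le_iff_toNat_le] at h1 h2
  simp only [Char.toNat]
  exact ⟨h1, h2⟩

-- lowerChar is the identity exactly on characters that are not letters of either case
theorem pv_lowerChar_fix_iff (c d : Char) (hupp : PySem.Chars.isupper d = false)
    (hrng : ¬(97 ≤ d.toNat ∧ d.toNat ≤ 122)) : PySem.Chars.lowerChar c = d ↔ c = d := by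
  constructor
  · intro h
    unfold PySem.Chars.lowerChar at h
    split at h
    · exfalso
      rename_i hu
      obtain ⟨h1, h2⟩ := pv_isupper_bounds c hu
      have hv : (c.toNat + 32).isValidChar := by left; omega
      have ht : (Char.ofNat (c.toNat + 32)).toNat = c.toNat + 32 := by
        rw [Char.toNat_ofNat]; simp [hv]
      rw [h] at ht
      exact hrng ⟨by omega, by omega⟩
    · exact h
  · intro h; subst h; unfold PySem.Chars.lowerChar; simp [hupp]

theorem pv_takeWhile_append_stop (p : Char → Bool) (l : List Char) (x : Char) (r : List Char)
    (hl : ∀ c ∈ l, p c = true) (hx : p x = false) : (l ++ x :: r).takeWhile p = l := by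
  induction l with
  | nil => simp [hx]
  | cons a as ih =>
    have ha := hl a (by simp)
    simp only [List.cons_append, List.takeWhile, ha]
    simp [ih (fun c hc => hl c (by simp [hc]))]

-- the central characterisation: A's prefix test ⟺ B's (keyword, delimiter) reading
theorem pv_key (t K : List Char) (d : Char)
    (ha : K.all PySem.Chars.isalpha = true) (hd : PySem.Chars.isalpha d = false)
    (hupp : PySem.Chars.isupper d = false) (hrng : ¬(97 ≤ d.toNat ∧ d.toNat ≤ 122)) :
    PySem.Chars.startswith (PySem.Chars.lower t) (K ++ [d]) = true ↔
      ((PySem.Chars.lower t).takeWhile PySem.Chars.isalpha = K ∧ t[K.length]? = some d) := by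
  constructor
  · intro h
    rw [PySem.Chars.startswith_iff] at h
    obtain ⟨r, hr⟩ := h
    rw [List.append_assoc, List.singleton_append] at hr
    constructor
    · rw [← hr, pv_takeWhile_append_stop _ _ _ _ (fun c hc => List.all_eq_true.mp ha c hc) hd]
    · have hlow : (PySem.Chars.lower t)[K.length]? = some d := by
        rw [← hr]
        rw [List.getElem?_append_right (le_refl _)]
        simp
      rw [PySem.Chars.lower, List.getElem?_map] at hlow
      cases ht : t[K.length]? with
      | none => rw [ht] at hlow; simp at hlow
      | some c =>
        rw [ht] at hlow
        simp only [Option.map_some, Option.some.injEq] at hlow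
        rw [← (pv_lowerChar_fix_iff c d hupp hrng).mp hlow]
  · rintro ⟨hkw, hget⟩
    have hlow : (PySem.Chars.lower t)[K.length]? = some d := by
      rw [PySem.Chars.lower, List.getElem?_map, hget]
      simp [(pv_lowerChar_fix_iff d d hupp hrng).mpr rfl]
    rw [PySem.Chars.startswith_iff]
    have hsplit := List.takeWhile_append_dropWhile (p := PySem.Chars.isalpha) (l := PySem.Chars.lower t)
    rw [hkw] at hsplit
    have hdw : ((PySem.Chars.lower t).dropWhile PySem.Chars.isalpha)[0]? = some d := by
      rw [← hlow]
      conv_rhs => rw [← hsplit]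
      rw [List.getElem?_append_right (le_refl _)]
      simp
    cases hcase : (PySem.Chars.lower t).dropWhile PySem.Chars.isalpha with
    | nil => rw [hcase] at hdw; simp at hdw
    | cons x xs =>
      rw [hcase] at hdw
      simp only [List.getElem?_cons_zero, Option.some.injEq] at hdw
      subst hdw
      exact ⟨xs, by rw [← hsplit, hcase]; simp⟩

theorem pv_cap_eq (l : List Char) : pvCapA l = PySem.Chars.upper (l.take 1) ++ l.drop 1 := by
  cases l <;> simp [pvCapA, PySem.Chars.upper]

theorem pv_body_eq (lines : List (List Char)) : pvBodyA lines = pvBodyB lines := by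
  induction lines with
  | nil => simp [pvBodyA, pvBodyB]
  | cons l ls ih =>
    simp only [pvBodyA, pvBodyB, List.map_cons, List.find?_cons]
    cases hcond : (!(PySem.Chars.strip l).isEmpty && !PySem.Chars.startswith (PySem.Chars.strip l) ['#'] &&
            !PySem.Chars.startswith (PySem.Chars.strip l) ['<', '!', '-', '-'] &&
          decide (10 < (PySem.Chars.strip l).length)) with
    | true => simp [hcond]
    | false => simp [hcond]; simpa [pvBodyB] using ih

set_option maxRecDepth 8192 in
theorem pv_strip_eq (t : List Char) : pvLoopA t pvPrefixesA = pvStripPrefixB t := by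
  by_cases h1 : PySem.Chars.startswith (PySem.Chars.lower t) (['f', 'e', 'a', 't', ':'] : List Char) = true
  · obtain ⟨hkw, hget⟩ := (pv_key t ['f', 'e', 'a', 't'] ':' (by decide) (by decide) (by decide) (by decide)).mp (by rw [show ((['f', 'e', 'a', 't'] : List Char) ++ [':']) = (['f', 'e', 'a', 't', ':'] : List Char) from rfl]; exact h1)
    have hget4 : t[4]? = some ':' := hget
    obtain ⟨hlt, hgetE⟩ := List.getElem?_eq_some_iff.mp hget4
    simp only [pvPrefixesA, pvLoopA, Bool.false_eq_true, if_false, h1, if_true]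
    simp [pvApplyPrefixA, pvStripPrefixB, pvColonKwsB, pvParenKwsB, hkw, hget4, hgetE, hlt]
  by_cases h2 : PySem.Chars.startswith (PySem.Chars.lower t) (['f', 'i', 'x', ':'] : List Char) = true
  · obtain ⟨hkw, hget⟩ := (pv_key t ['f', 'i', 'x'] ':' (by decide) (by decide) (by decide) (by decide)).mp (by rw [show ((['f', 'i', 'x'] : List Char) ++ [':']) = (['f', 'i', 'x', ':'] : List Char) from rfl]; exact h2)
    have hget4 : t[3]? = some ':' := hget
    obtain ⟨hlt, hgetE⟩ := List.getElem?_eq_some_iff.mp hget4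
    simp only [pvPrefixesA, pvLoopA, h1, Bool.false_eq_true, if_false, h2, if_true]
    simp [pvApplyPrefixA, pvStripPrefixB, pvColonKwsB, pvParenKwsB, hkw, hget4, hgetE, hlt]
  by_cases h3 : PySem.Chars.startswith (PySem.Chars.lower t) (['c', 'h', 'o', 'r', 'e', ':'] : List Char) = true
  · obtain ⟨hkw, hget⟩ := (pv_key t ['c', 'h', 'o', 'r', 'e'] ':' (by decide) (by decide) (by decide) (by decide)).mp (by rw [show ((['c', 'h', 'o', 'r', 'e'] : List Char) ++ [':']) = (['c', 'h', 'o', 'r', 'e', ':'] : List Char) from rfl]; exact h3)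
    have hget4 : t[5]? = some ':' := hget
    obtain ⟨hlt, hgetE⟩ := List.getElem?_eq_some_iff.mp hget4
    simp only [pvPrefixesA, pvLoopA, h1, h2, Bool.false_eq_true, if_false, h3, if_true]
    simp [pvApplyPrefixA, pvStripPrefixB, pvColonKwsB, pvParenKwsB, hkw, hget4, hgetE, hlt]
  by_cases h4 : PySem.Chars.startswith (PySem.Chars.lower t) (['d', 'o', 'c', 's', ':'] : List Char) = true
  · obtain ⟨hkw, hget⟩ := (pv_key t ['d', 'o', 'c', 's'] ':' (by decide) (by decide) (by decide) (by decide)).mp (by rw [show ((['d', 'o', 'c', 's'] : List Char) ++ [':']) = (['d', 'o', 'c', 's', ':'] : List Char) from rfl]; exact h4)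
    have hget4 : t[4]? = some ':' := hget
    obtain ⟨hlt, hgetE⟩ := List.getElem?_eq_some_iff.mp hget4
    simp only [pvPrefixesA, pvLoopA, h1, h2, h3, Bool.false_eq_true, if_false, h4, if_true]
    simp [pvApplyPrefixA, pvStripPrefixB, pvColonKwsB, pvParenKwsB, hkw, hget4, hgetE, hlt]
  by_cases h5 : PySem.Chars.startswith (PySem.Chars.lower t) (['r', 'e', 'f', 'a', 'c', 't', 'o', 'r', ':'] : List Char) = true
  · obtain ⟨hkw, hget⟩ := (pv_key t ['r', 'e', 'f', 'a', 'c', 't', 'o', 'r'] ':' (by decide) (by decide) (by decide) (by decide)).mp (by rw [show ((['r', 'e', 'f', 'a', 'c', 't', 'o', 'r'] : List Char) ++ [':']) = (['r', 'e', 'f', 'a', 'c', 't', 'o', 'r', ':'] : List Char) from rfl]; exact h5)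
    have hget4 : t[8]? = some ':' := hget
    obtain ⟨hlt, hgetE⟩ := List.getElem?_eq_some_iff.mp hget4
    simp only [pvPrefixesA, pvLoopA, h1, h2, h3, h4, Bool.false_eq_true, if_false, h5, if_true]
    simp [pvApplyPrefixA, pvStripPrefixB, pvColonKwsB, pvParenKwsB, hkw, hget4, hgetE, hlt]
  by_cases h6 : PySem.Chars.startswith (PySem.Chars.lower t) (['p', 'e', 'r', 'f', ':'] : List Char) = true
  · obtain ⟨hkw, hget⟩ := (pv_key t ['p', 'e', 'r', 'f'] ':' (by decide) (by decide) (by decide) (by decide)).mp (by rw [show ((['p', 'e', 'r', 'f'] : List Char) ++ [':']) = (['p', 'e', 'r', 'f', ':'] : List Char) from rfl]; exact h6)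
    have hget4 : t[4]? = some ':' := hget
    obtain ⟨hlt, hgetE⟩ := List.getElem?_eq_some_iff.mp hget4
    simp only [pvPrefixesA, pvLoopA, h1, h2, h3, h4, h5, Bool.false_eq_true, if_false, h6, if_true]
    simp [pvApplyPrefixA, pvStripPrefixB, pvColonKwsB, pvParenKwsB, hkw, hget4, hgetE, hlt]
  by_cases h7 : PySem.Chars.startswith (PySem.Chars.lower t) (['c', 'i', ':'] : List Char) = true
  · obtain ⟨hkw, hget⟩ := (pv_key t ['c', 'i'] ':' (by decide) (by decide) (by decide) (by decide)).mp (by rw [show ((['c', 'i'] : List Char) ++ [':']) = (['c', 'i', ':'] : List Char) from rfl]; exact h7)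
    have hget4 : t[2]? = some ':' := hget
    obtain ⟨hlt, hgetE⟩ := List.getElem?_eq_some_iff.mp hget4
    simp only [pvPrefixesA, pvLoopA, h1, h2, h3, h4, h5, h6, Bool.false_eq_true, if_false, h7, if_true]
    simp [pvApplyPrefixA, pvStripPrefixB, pvColonKwsB, pvParenKwsB, hkw, hget4, hgetE, hlt]
  by_cases h8 : PySem.Chars.startswith (PySem.Chars.lower t) (['t', 'e', 's', 't', ':'] : List Char) = true
  · obtain ⟨hkw, hget⟩ := (pv_key t ['t', 'e', 's', 't'] ':' (by decide) (by decide) (by decide) (by decide)).mp (by rw [show ((['t', 'e', 's', 't'] : List Char) ++ [':']) = (['t', 'e', 's', 't', ':'] : List Char) from rfl]; exact h8)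
    have hget4 : t[4]? = some ':' := hget
    obtain ⟨hlt, hgetE⟩ := List.getElem?_eq_some_iff.mp hget4
    simp only [pvPrefixesA, pvLoopA, h1, h2, h3, h4, h5, h6, h7, Bool.false_eq_true, if_false, h8, if_true]
    simp [pvApplyPrefixA, pvStripPrefixB, pvColonKwsB, pvParenKwsB, hkw, hget4, hgetE, hlt]
  by_cases h9 : PySem.Chars.startswith (PySem.Chars.lower t) (['f', 'e', 'a', 't', '('] : List Char) = true
  · obtain ⟨hkw, hget⟩ := (pv_key t ['f', 'e', 'a', 't'] '(' (by decide) (by decide) (by decide) (by decide)).mp (by rw [show ((['f', 'e', 'a', 't'] : List Char) ++ ['(']) = (['f', 'e', 'a', 't', '('] : List Char) from rfl]; exact h9)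
    have hget4 : t[4]? = some '(' := hget
    obtain ⟨hlt, hgetE⟩ := List.getElem?_eq_some_iff.mp hget4
    simp only [pvPrefixesA, pvLoopA, h1, h2, h3, h4, h5, h6, h7, h8, Bool.false_eq_true, if_false, h9, if_true]
    simp [pvApplyPrefixA, pvStripPrefixB, pvColonKwsB, pvParenKwsB, hkw, hget4, hgetE, hlt]
  by_cases h10 : PySem.Chars.startswith (PySem.Chars.lower t) (['f', 'i', 'x', '('] : List Char) = true
  · obtain ⟨hkw, hget⟩ := (pv_key t ['f', 'i', 'x'] '(' (by decide) (by decide) (by decide) (by decide)).mp (by rw [show ((['f', 'i', 'x'] : List Char) ++ ['(']) = (['f', 'i', 'x', '('] : List Char) from rfl]; exact h10)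
    have hget4 : t[3]? = some '(' := hget
    obtain ⟨hlt, hgetE⟩ := List.getElem?_eq_some_iff.mp hget4
    simp only [pvPrefixesA, pvLoopA, h1, h2, h3, h4, h5, h6, h7, h8, h9, Bool.false_eq_true, if_false, h10, if_true]
    simp [pvApplyPrefixA, pvStripPrefixB, pvColonKwsB, pvParenKwsB, hkw, hget4, hgetE, hlt]
  by_cases h11 : PySem.Chars.startswith (PySem.Chars.lower t) (['c', 'h', 'o', 'r', 'e', '('] : List Char) = true
  · obtain ⟨hkw, hget⟩ := (pv_key t ['c', 'h', 'o', 'r', 'e'] '(' (by decide) (by decide) (by decide) (by decide)).mp (by rw [show ((['c', 'h', 'o', 'r', 'e'] : List Char) ++ ['(']) = (['c', 'h', 'o', 'r', 'e', '('] : List Char) from rfl]; exact h11)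
    have hget4 : t[5]? = some '(' := hget
    obtain ⟨hlt, hgetE⟩ := List.getElem?_eq_some_iff.mp hget4
    simp only [pvPrefixesA, pvLoopA, h1, h2, h3, h4, h5, h6, h7, h8, h9, h10, Bool.false_eq_true, if_false, h11, if_true]
    simp [pvApplyPrefixA, pvStripPrefixB, pvColonKwsB, pvParenKwsB, hkw, hget4, hgetE, hlt]
  by_cases h12 : PySem.Chars.startswith (PySem.Chars.lower t) (['d', 'o', 'c', 's', '('] : List Char) = true
  · obtain ⟨hkw, hget⟩ := (pv_key t ['d', 'o', 'c', 's'] '(' (by decide) (by decide) (by decide) (by decide)).mp (by rw [show ((['d', 'o', 'c', 's'] : List Char) ++ ['(']) = (['d', 'o', 'c', 's', '('] : List Char) from rfl]; exact h12)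
    have hget4 : t[4]? = some '(' := hget
    obtain ⟨hlt, hgetE⟩ := List.getElem?_eq_some_iff.mp hget4
    simp only [pvPrefixesA, pvLoopA, h1, h2, h3, h4, h5, h6, h7, h8, h9, h10, h11, Bool.false_eq_true, if_false, h12, if_true]
    simp [pvApplyPrefixA, pvStripPrefixB, pvColonKwsB, pvParenKwsB, hkw, hget4, hgetE, hlt]
  by_cases h13 : PySem.Chars.startswith (PySem.Chars.lower t) (['r', 'e', 'f', 'a', 'c', 't', 'o', 'r', '('] : List Char) = true
  · obtain ⟨hkw, hget⟩ := (pv_key t ['r', 'e', 'f', 'a', 'c', 't', 'o', 'r'] '(' (by decide) (by decide) (by decide) (by decide)).mp (by rw [show ((['r', 'e', 'f', 'a', 'c', 't', 'o', 'r'] : List Char) ++ ['(']) = (['r', 'e', 'f', 'a', 'c', 't', 'o', 'r', '('] : List Char) from rfl]; exact h13)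
    have hget4 : t[8]? = some '(' := hget
    obtain ⟨hlt, hgetE⟩ := List.getElem?_eq_some_iff.mp hget4
    simp only [pvPrefixesA, pvLoopA, h1, h2, h3, h4, h5, h6, h7, h8, h9, h10, h11, h12, Bool.false_eq_true, if_false, h13, if_true]
    simp [pvApplyPrefixA, pvStripPrefixB, pvColonKwsB, pvParenKwsB, hkw, hget4, hgetE, hlt]
  by_cases h14 : PySem.Chars.startswith (PySem.Chars.lower t) (['p', 'e', 'r', 'f', '('] : List Char) = true
  · obtain ⟨hkw, hget⟩ := (pv_key t ['p', 'e', 'r', 'f'] '(' (by decide) (by decide) (by decide) (by decide)).mp (by rw [show ((['p', 'e', 'r', 'f'] : List Char) ++ ['(']) = (['p', 'e', 'r', 'f', '('] : List Char) from rfl]; exact h14)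
    have hget4 : t[4]? = some '(' := hget
    obtain ⟨hlt, hgetE⟩ := List.getElem?_eq_some_iff.mp hget4
    simp only [pvPrefixesA, pvLoopA, h1, h2, h3, h4, h5, h6, h7, h8, h9, h10, h11, h12, h13, Bool.false_eq_true, if_false, h14, if_true]
    simp [pvApplyPrefixA, pvStripPrefixB, pvColonKwsB, pvParenKwsB, hkw, hget4, hgetE, hlt]
  have hcol : ∀ K ∈ pvColonKwsB, ¬ ((PySem.Chars.lower t).takeWhile PySem.Chars.isalpha = K ∧ t[K.length]? = some ':') := by
    intro K hK
    simp only [pvColonKwsB, List.mem_cons, List.not_mem_nil, or_false] at hK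
    rcases hK with h | h | h | h | h | h | h | h <;> subst h <;> intro hc
    · exact absurd ((pv_key t ['f', 'e', 'a', 't'] ':' (by decide) (by decide) (by decide) (by decide)).mpr hc) (by rw [show ((['f', 'e', 'a', 't'] : List Char) ++ [':']) = (['f', 'e', 'a', 't', ':'] : List Char) from rfl]; exact h1)
    · exact absurd ((pv_key t ['f', 'i', 'x'] ':' (by decide) (by decide) (by decide) (by decide)).mpr hc) (by rw [show ((['f', 'i', 'x'] : List Char) ++ [':']) = (['f', 'i', 'x', ':'] : List Char) from rfl]; exact h2)
    · exact absurd ((pv_key t ['c', 'h', 'o', 'r', 'e'] ':' (by decide) (by decide) (by decide) (by decide)).mpr hc) (by rw [show ((['c', 'h', 'o', 'r', 'e'] : List Char) ++ [':']) = (['c', 'h', 'o', 'r', 'e', ':'] : List Char) from rfl]; exact h3)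
    · exact absurd ((pv_key t ['d', 'o', 'c', 's'] ':' (by decide) (by decide) (by decide) (by decide)).mpr hc) (by rw [show ((['d', 'o', 'c', 's'] : List Char) ++ [':']) = (['d', 'o', 'c', 's', ':'] : List Char) from rfl]; exact h4)
    · exact absurd ((pv_key t ['r', 'e', 'f', 'a', 'c', 't', 'o', 'r'] ':' (by decide) (by decide) (by decide) (by decide)).mpr hc) (by rw [show ((['r', 'e', 'f', 'a', 'c', 't', 'o', 'r'] : List Char) ++ [':']) = (['r', 'e', 'f', 'a', 'c', 't', 'o', 'r', ':'] : List Char) from rfl]; exact h5)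
    · exact absurd ((pv_key t ['p', 'e', 'r', 'f'] ':' (by decide) (by decide) (by decide) (by decide)).mpr hc) (by rw [show ((['p', 'e', 'r', 'f'] : List Char) ++ [':']) = (['p', 'e', 'r', 'f', ':'] : List Char) from rfl]; exact h6)
    · exact absurd ((pv_key t ['c', 'i'] ':' (by decide) (by decide) (by decide) (by decide)).mpr hc) (by rw [show ((['c', 'i'] : List Char) ++ [':']) = (['c', 'i', ':'] : List Char) from rfl]; exact h7)
    · exact absurd ((pv_key t ['t', 'e', 's', 't'] ':' (by decide) (by decide) (by decide) (by decide)).mpr hc) (by rw [show ((['t', 'e', 's', 't'] : List Char) ++ [':']) = (['t', 'e', 's', 't', ':'] : List Char) from rfl]; exact h8)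
  have hpar : ∀ K ∈ pvParenKwsB, ¬ ((PySem.Chars.lower t).takeWhile PySem.Chars.isalpha = K ∧ t[K.length]? = some '(') := by
    intro K hK
    simp only [pvParenKwsB, List.mem_cons, List.not_mem_nil, or_false] at hK
    rcases hK with h | h | h | h | h | h <;> subst h <;> intro hc
    · exact absurd ((pv_key t ['f', 'e', 'a', 't'] '(' (by decide) (by decide) (by decide) (by decide)).mpr hc) (by rw [show ((['f', 'e', 'a', 't'] : List Char) ++ ['(']) = (['f', 'e', 'a', 't', '('] : List Char) from rfl]; exact h9)
    · exact absurd ((pv_key t ['f', 'i', 'x'] '(' (by decide) (by decide) (by decide) (by decide)).mpr hc) (by rw [show ((['f', 'i', 'x'] : List Char) ++ ['(']) = (['f', 'i', 'x', '('] : List Char) from rfl]; exact h10)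
    · exact absurd ((pv_key t ['c', 'h', 'o', 'r', 'e'] '(' (by decide) (by decide) (by decide) (by decide)).mpr hc) (by rw [show ((['c', 'h', 'o', 'r', 'e'] : List Char) ++ ['(']) = (['c', 'h', 'o', 'r', 'e', '('] : List Char) from rfl]; exact h11)
    · exact absurd ((pv_key t ['d', 'o', 'c', 's'] '(' (by decide) (by decide) (by decide) (by decide)).mpr hc) (by rw [show ((['d', 'o', 'c', 's'] : List Char) ++ ['(']) = (['d', 'o', 'c', 's', '('] : List Char) from rfl]; exact h12)
    · exact absurd ((pv_key t ['r', 'e', 'f', 'a', 'c', 't', 'o', 'r'] '(' (by decide) (by decide) (by decide) (by decide)).mpr hc) (by rw [show ((['r', 'e', 'f', 'a', 'c', 't', 'o', 'r'] : List Char) ++ ['(']) = (['r', 'e', 'f', 'a', 'c', 't', 'o', 'r', '('] : List Char) from rfl]; exact h13)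
    · exact absurd ((pv_key t ['p', 'e', 'r', 'f'] '(' (by decide) (by decide) (by decide) (by decide)).mpr hc) (by rw [show ((['p', 'e', 'r', 'f'] : List Char) ++ ['(']) = (['p', 'e', 'r', 'f', '('] : List Char) from rfl]; exact h14)
  have hc1 : (decide ((((PySem.Chars.lower t).takeWhile PySem.Chars.isalpha).length) < t.length) && (t[((PySem.Chars.lower t).takeWhile PySem.Chars.isalpha).length]? == some ':') && pvColonKwsB.contains ((PySem.Chars.lower t).takeWhile PySem.Chars.isalpha)) = false := by
    by_contra hcc
    rw [Bool.not_eq_false, Bool.and_eq_true, Bool.and_eq_true] at hcc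
    obtain ⟨⟨-, hgetb⟩, hcont⟩ := hcc
    rw [beq_iff_eq] at hgetb
    exact hcol _ (by simpa using hcont) ⟨rfl, hgetb⟩
  have hc2 : (decide ((((PySem.Chars.lower t).takeWhile PySem.Chars.isalpha).length) < t.length) && (t[((PySem.Chars.lower t).takeWhile PySem.Chars.isalpha).length]? == some '(') && pvParenKwsB.contains ((PySem.Chars.lower t).takeWhile PySem.Chars.isalpha)) = false := by
    by_contra hcc
    rw [Bool.not_eq_false, Bool.and_eq_true, Bool.and_eq_true] at hcc
    obtain ⟨⟨-, hgetb⟩, hcont⟩ := hcc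
    rw [beq_iff_eq] at hgetb
    exact hpar _ (by simpa using hcont) ⟨rfl, hgetb⟩
  simp only [pvStripPrefixB, hc1, hc2, Bool.false_eq_true, if_false]
  simp [pvPrefixesA, pvLoopA, h1, h2, h3, h4, h5, h6, h7, h8, h9, h10, h11, h12, h13, h14]

theorem pv_title_eq (t : List Char) :
    pvCapA (pvLoopA t pvPrefixesA) =
      PySem.Chars.upper ((pvStripPrefixB t).take 1) ++ (pvStripPrefixB t).drop 1 := by
  rw [pv_strip_eq, pv_cap_eq]

-- ===== VERDICT (by name: the statement is the Claim_ definition above) =====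
theorem fallback_rewrite_py_spec : Claim_equal_fallback_rewrite_py := by
  intro title body _
  unfold Spec_fallback_rewrite_py fallback_rewrite_py fallback_rewrite_py_alt
  rw [pv_title_eq, pv_body_eq]
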